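-- pv_equiv track=rewrite | github.com/Ookamiko/AdventOfCode | year_2022/day/day24.py | move_blizzards
-- ===== SOURCE A (Python) =====
-- def move_blizzards(blizzards, modif_blizzards, max_row, max_column, recurence=1):
-- 	new_pos = []
--
-- 	for blizzard in blizzards:
-- 		new_pos.append(blizzard)
--
-- 	for x in range(recurence):
-- 		for i in range(len(new_pos)):
-- 			tmp_pos = new_pos[i] + modif_blizzards[i]
--
-- 			if tmp_pos % max_column == 0:
-- 				tmp_pos += max_column - 2
-- 			elif tmp_pos // max_column == 0:
-- 				tmp_pos += max_column * (max_row - 2)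
-- 			elif tmp_pos > max_column * (max_row - 1):
-- 				tmp_pos -= max_column * (max_row - 2)
-- 			elif tmp_pos % max_column == max_column - 1:
-- 				tmp_pos -= max_column - 2
--
-- 			new_pos[i] = tmp_pos
--
-- 	return new_pos
-- ===== SOURCE B (Python) =====
-- def move_blizzards(blizzards, modif_blizzards, max_row, max_column, recurence=1):
-- 	# Advance each blizzard independently: walk its own orbit with a first-visit
-- 	# dictionary; on a repeat, jump the remaining steps with one modular index
-- 	# into the recorded trajectory. Loop-invariant products are hoisted.
-- 	if recurence <= 0:
-- 		return list(blizzards)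
-- 	edge = max_column - 2
-- 	top = max_column * (max_row - 1)
-- 	wrap = max_column * (max_row - 2)
-- 	result = []
-- 	for i, pos in enumerate(blizzards):
-- 		m = modif_blizzards[i]
-- 		seen = {}
-- 		traj = []
-- 		cur = pos
-- 		k = 0
-- 		while k < recurence:
-- 			if cur in seen:
-- 				j = seen[cur]
-- 				cur = traj[j + (recurence - j) % (k - j)]
-- 				break
-- 			seen[cur] = k
-- 			traj.append(cur)
-- 			t = cur + m
-- 			rem = t % max_column
-- 			if rem == 0:
-- 				t += edge
-- 			elif t // max_column == 0:
-- 				t += wrap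
-- 			elif t > top:
-- 				t -= wrap
-- 			elif rem == max_column - 1:
-- 				t -= edge
-- 			cur = t
-- 			k += 1
-- 		result.append(cur)
-- 	return result
-- ===== Notes on version B (the rewrite author's own statement) =====
-- stated objective: alternative
-- what changed: A simulates all `recurence` ticks over the whole list; B advances each blizzard independently, detecting the cycle of its orbit with a first-visit dictionary and jumping the remaining steps with one modular index into the recorded trajectory.
import Mathlib
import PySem

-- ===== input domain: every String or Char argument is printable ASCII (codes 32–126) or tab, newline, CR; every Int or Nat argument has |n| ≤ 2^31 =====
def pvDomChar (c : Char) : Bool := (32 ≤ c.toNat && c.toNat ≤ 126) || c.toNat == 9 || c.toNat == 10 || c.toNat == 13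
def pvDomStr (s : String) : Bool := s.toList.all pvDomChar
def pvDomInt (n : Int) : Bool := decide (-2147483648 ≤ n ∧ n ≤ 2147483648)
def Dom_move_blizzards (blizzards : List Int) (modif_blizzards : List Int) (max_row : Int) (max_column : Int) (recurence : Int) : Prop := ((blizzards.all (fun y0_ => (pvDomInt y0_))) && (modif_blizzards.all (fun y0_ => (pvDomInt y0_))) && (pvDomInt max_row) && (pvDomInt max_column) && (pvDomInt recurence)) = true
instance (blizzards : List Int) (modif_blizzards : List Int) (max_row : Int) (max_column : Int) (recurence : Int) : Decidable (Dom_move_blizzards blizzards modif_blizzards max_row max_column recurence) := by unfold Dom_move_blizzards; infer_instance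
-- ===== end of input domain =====

-- B replaces A's step-by-step simulation of all `recurence` ticks by an independent
-- per-blizzard advance with orbit cycle detection and a modular jump into the recorded
-- trajectory (alternative algorithm; loop-invariant products are hoisted).

-- ===== PORT A =====
-- the shared single-step wrap rule (the body of A's inner loop and of B's `step`)
def pvStep (max_row max_column m p : Int) : Int :=
  let t := p + m
  if PySem.Int.mod t max_column = 0 then t + (max_column - 2)
  else if PySem.Int.floordiv t max_column = 0 then t + max_column * (max_row - 2)
  else if t > max_column * (max_row - 1) then t - max_column * (max_row - 2)
  else if PySem.Int.mod t max_column = max_column - 1 then t - (max_column - 2)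
  else t

def move_blizzards (blizzards : List Int) (modif_blizzards : List Int) (max_row : Int) (max_column : Int) (recurence : Int) : List Int :=
  let new_pos := blizzards.foldl (fun acc b => acc ++ [b]) []
  (PySem.List.pyRange 0 recurence 1).foldl
    (fun np _ =>
      (PySem.List.pyRange 0 (np.length : Int) 1).foldl
        (fun np i =>
          PySem.List.pySetD np i
            (pvStep max_row max_column (PySem.List.pyGetD modif_blizzards i 0)
              (PySem.List.pyGetD np i 0)))
        np)
    new_pos

-- ===== PORT B =====
-- B's while-loop: walk the orbit recording first-visit indices; on a repeat, jump
-- to traj[j + (recurence - j) % (k - j)]; fuel counts the remaining iterations (k < recurence).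
def pvAdvLoop (f : Int → Int) (recurence : Int) :
    Nat → Int → PySem.Dict Int Int → List Int → Int → Int
  | 0, _, _, _, cur => cur
  | fuel + 1, k, seen, traj, cur =>
    match seen.get? cur with
    | some j => PySem.List.pyGetD traj (j + PySem.Int.mod (recurence - j) (k - j)) 0
    | none => pvAdvLoop f recurence fuel (k + 1) (seen.insert cur k) (traj ++ [cur]) (f cur)

-- B's single step with the loop-invariant products `edge`, `top`, `wrap` hoisted
def pvStepB (max_column edge top wrap m p : Int) : Int :=
  let t := p + m
  let rem := PySem.Int.mod t max_column
  if rem = 0 then t + edge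
  else if PySem.Int.floordiv t max_column = 0 then t + wrap
  else if t > top then t - wrap
  else if rem = max_column - 1 then t - edge
  else t

def move_blizzards_alt (blizzards : List Int) (modif_blizzards : List Int) (max_row : Int) (max_column : Int) (recurence : Int) : List Int :=
  if recurence ≤ 0 then blizzards
  else
    let edge := max_column - 2
    let top := max_column * (max_row - 1)
    let wrap := max_column * (max_row - 2)
    (PySem.List.enumerate blizzards 0).map
      (fun ip =>
        pvAdvLoop
          (pvStepB max_column edge top wrap (PySem.List.pyGetD modif_blizzards ip.1 0))
          recurence recurence.toNat 0 PySem.Dict.empty [] ip.2)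

-- ===== PRECONDITION & SPEC =====
-- Pre_ excludes exactly the inputs on which Python A raises: with recurence ≥ 1 and a
-- nonempty list, A raises ZeroDivisionError when max_column = 0 and IndexError when
-- modif_blizzards is shorter than blizzards; it returns on everything else.
def Pre_move_blizzards (blizzards : List Int) (modif_blizzards : List Int) (max_row : Int) (max_column : Int) (recurence : Int) : Prop :=
  recurence ≤ 0 ∨ blizzards = [] ∨ (max_column ≠ 0 ∧ blizzards.length ≤ modif_blizzards.length)
instance (blizzards : List Int) (modif_blizzards : List Int) (max_row : Int) (max_column : Int) (recurence : Int) : Decidable (Pre_move_blizzards blizzards modif_blizzards max_row max_column recurence) := by unfold Pre_move_blizzards; infer_instance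

def pvWitness_move_blizzards : List Int × List Int × Int × Int × Int := ([7, 10], [1, -6], 4, 6, 3)

def Spec_move_blizzards (blizzards : List Int) (modif_blizzards : List Int) (max_row : Int) (max_column : Int) (recurence : Int) (out : List Int) : Prop := out = move_blizzards_alt blizzards modif_blizzards max_row max_column recurence
instance (blizzards : List Int) (modif_blizzards : List Int) (max_row : Int) (max_column : Int) (recurence : Int) (out : List Int) : Decidable (Spec_move_blizzards blizzards modif_blizzards max_row max_column recurence out) := by unfold Spec_move_blizzards; infer_instance

-- ===== CLAIM (what is proved, stated in full; the proofs are below) =====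
def Claim_equal_move_blizzards : Prop := ∀ (blizzards : List Int) (modif_blizzards : List Int) (max_row : Int) (max_column : Int) (recurence : Int), Dom_move_blizzards blizzards modif_blizzards max_row max_column recurence → Pre_move_blizzards blizzards modif_blizzards max_row max_column recurence → Spec_move_blizzards blizzards modif_blizzards max_row max_column recurence (move_blizzards blizzards modif_blizzards max_row max_column recurence)


-- ===== LEMMAS AND PROOFS =====

-- `for b in blizzards: new_pos.append(b)` is the identity copy
theorem pv_foldl_append (l acc : List Int) : l.foldl (fun a b => a ++ [b]) acc = acc ++ l := by
  induction l generalizing acc with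
  | nil => simp
  | cons x t ih => simp [List.foldl_cons, ih]

theorem pv_getD_append (pre : List Int) (p : Int) (rest : List Int) :
    (pre ++ p :: rest).getD pre.length 0 = p := by
  induction pre with
  | nil => simp
  | cons x t ih => simpa using ih

theorem pv_set_append (pre : List Int) (p v : Int) (rest : List Int) :
    (pre ++ p :: rest).set pre.length v = pre ++ v :: rest := by
  induction pre with
  | nil => simp
  | cons x t ih => simpa using ih

theorem pv_mapIdx_mapIdx (l : List Int) (h g : Nat → Int → Int) :
    (l.mapIdx h).mapIdx g = l.mapIdx (fun i p => g i (h i p)) := by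
  apply List.ext_getElem
  · simp
  · intro i h1 h2
    simp [List.getElem_mapIdx]

theorem pv_mapIdx_id (l : List Int) : l.mapIdx (fun _ p => p) = l := by
  apply List.ext_getElem
  · simp
  · intro i h1 h2
    simp [List.getElem_mapIdx]

theorem pv_foldl_const {β : Type} (F : β → β) (l : List Int) (x : β) :
    l.foldl (fun s _ => F s) x = F^[l.length] x := by
  induction l generalizing x with
  | nil => simp
  | cons y t ih => simp [List.foldl_cons, ih, Function.iterate_succ_apply]

-- the inner index loop updates each slot independently: it is a mapIdx
theorem pv_inner (modif : List Int) (mr mc : Int) :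
    ∀ (suf pre : List Int),
      (PySem.List.pyRange (pre.length : Int) ((pre.length : Int) + (suf.length : Int)) 1).foldl
        (fun np i =>
          PySem.List.pySetD np i
            (pvStep mr mc (PySem.List.pyGetD modif i 0) (PySem.List.pyGetD np i 0)))
        (pre ++ suf)
      = pre ++ suf.mapIdx (fun j p => pvStep mr mc (modif.getD (pre.length + j) 0) p) := by
  intro suf
  induction suf with
  | nil =>
    intro pre
    rw [PySem.List.pyRange_one_eq_nil (by simp)]
    simp
  | cons p rest ih =>
    intro pre
    have hlt : (pre.length : Int) < (pre.length : Int) + ((p :: rest).length : Int) := by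
      simp only [List.length_cons]; push_cast; omega
    rw [PySem.List.pyRange_one_cons hlt, List.foldl_cons]
    rw [PySem.List.pySetD_natCast, PySem.List.pyGetD_natCast, PySem.List.pyGetD_natCast]
    rw [pv_getD_append, pv_set_append]
    set v := pvStep mr mc (modif.getD pre.length 0) p with hv
    have hsplit : pre ++ v :: rest = (pre ++ [v]) ++ rest := by simp
    have hlen : ((pre ++ [v]).length : Int) = (pre.length : Int) + 1 := by simp
    have hlen2 : (pre.length : Int) + ((p :: rest).length : Int)
        = ((pre ++ [v]).length : Int) + (rest.length : Int) := by simp; omega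
    rw [hsplit, hlen2, ← hlen]
    rw [ih (pre ++ [v])]
    simp only [List.mapIdx_cons, List.length_append, List.length_cons, List.length_nil]
    rw [List.append_assoc]
    simp only [List.singleton_append, Nat.add_zero]
    congr 1
    congr 1
    apply List.ext_getElem
    · simp
    · intro i h1 h2
      simp only [List.getElem_mapIdx]
      congr 2
      omega

theorem pv_inner0 (modif : List Int) (mr mc : Int) (np : List Int) :
    (PySem.List.pyRange 0 (np.length : Int) 1).foldl
      (fun np i =>
        PySem.List.pySetD np i
          (pvStep mr mc (PySem.List.pyGetD modif i 0) (PySem.List.pyGetD np i 0)))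
      np
    = np.mapIdx (fun j p => pvStep mr mc (modif.getD j 0) p) := by
  have h := pv_inner modif mr mc np []
  simpa using h

theorem pv_iter_mapIdx (g : Nat → Int → Int) (n : Nat) (l : List Int) :
    (fun np : List Int => np.mapIdx g)^[n] l = l.mapIdx (fun i p => (g i)^[n] p) := by
  induction n with
  | zero => simpa using (pv_mapIdx_id l).symm
  | succ n ih =>
    rw [Function.iterate_succ_apply', ih, pv_mapIdx_mapIdx]
    apply List.ext_getElem
    · simp
    · intro i h1 h2
      simp [List.getElem_mapIdx, Function.iterate_succ_apply']

-- A computes, per index, the r-fold iterate of the one-step wrap rule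
theorem pv_A (blz modif : List Int) (mr mc r : Int) :
    move_blizzards blz modif mr mc r
      = blz.mapIdx (fun i p => (fun q => pvStep mr mc (modif.getD i 0) q)^[r.toNat] p) := by
  unfold move_blizzards
  simp only [pv_foldl_append, List.nil_append]
  simp only [pv_inner0 modif mr mc]
  rw [pv_foldl_const (fun np : List Int => np.mapIdx fun j p => pvStep mr mc (modif.getD j 0) p)]
  rw [PySem.List.length_pyRange_one]
  simp only [Int.sub_zero]
  exact pv_iter_mapIdx _ _ blz

-- orbit periodicity: a repeat at (J, K) pins every later iterate modulo K - J
theorem pv_iter_cycle (f : Int → Int) (p : Int) (J K : Nat) (hlt : J < K)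
    (heq : f^[J] p = f^[K] p) :
    ∀ m : Nat, f^[J + m] p = f^[J + m % (K - J)] p := by
  intro m
  induction m using Nat.strong_induction_on with
  | _ m ih =>
    by_cases hm : m < K - J
    · rw [Nat.mod_eq_of_lt hm]
    · push_neg at hm
      have h1 : m % (K - J) = (m - (K - J)) % (K - J) := Nat.mod_eq_sub_mod hm
      have h2 : J + m = (m - (K - J)) + K := by omega
      rw [h1, h2, Function.iterate_add_apply, ← heq, ← Function.iterate_add_apply]
      have h3 : m - (K - J) + J = J + (m - (K - J)) := by omega
      rw [h3, ih _ (by omega)]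

-- the cycle-detecting walk computes the r-th iterate
theorem pv_adv (f : Int → Int) (r p : Int) (hr : 1 ≤ r) :
    ∀ (fuel : Nat) (seen : PySem.Dict Int Int) (traj : List Int),
      fuel + traj.length = r.toNat →
      (∀ j : Nat, j < traj.length → traj.getD j 0 = f^[j] p) →
      (∀ v jv, seen.get? v = some jv →
        ∃ j : Nat, jv = (j : Int) ∧ j < traj.length ∧ f^[j] p = v) →
      pvAdvLoop f r fuel (traj.length : Int) seen traj (f^[traj.length] p) = f^[r.toNat] p := by
  intro fuel
  induction fuel with
  | zero =>
    intro seen traj hlen htraj hseen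
    simp only [pvAdvLoop]
    rw [Nat.zero_add] at hlen
    rw [hlen]
  | succ fuel ih =>
    intro seen traj hlen htraj hseen
    simp only [pvAdvLoop]
    cases hget : seen.get? (f^[traj.length] p) with
    | none =>
      dsimp only
      have hc1 : (traj.length : Int) + 1 = ((traj ++ [f^[traj.length] p]).length : Int) := by
        simp
      have hc2 : f (f^[traj.length] p) = f^[(traj ++ [f^[traj.length] p]).length] p := by
        simp [Function.iterate_succ_apply']
      rw [hc1, hc2]
      apply ih
      · simp; omega
      · intro j hj
        simp only [List.length_append, List.length_cons, List.length_nil] at hj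
        by_cases hjlt : j < traj.length
        · rw [List.getD_append _ _ _ _ hjlt]
          exact htraj j hjlt
        · have hje : j = traj.length := by omega
          subst hje
          rw [pv_getD_append traj _ []]
      · intro v jv hvg
        rw [PySem.Dict.get?_insert] at hvg
        by_cases hv : v = f^[traj.length] p
        · rw [if_pos hv] at hvg
          refine ⟨traj.length, (Option.some.inj hvg).symm, by simp, hv.symm⟩
        · rw [if_neg hv] at hvg
          obtain ⟨j, hj1, hj2, hj3⟩ := hseen v jv hvg
          exact ⟨j, hj1, by simp; omega, hj3⟩
    | some jv =>
      dsimp only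
      obtain ⟨j, hj1, hj2, hj3⟩ := hseen _ jv hget
      subst hj1
      have hN : r = (r.toNat : Int) := (Int.toNat_of_nonneg (by omega)).symm
      have hKN : traj.length < r.toNat := by omega
      have e1 : r - (j : Int) = ((r.toNat - j : Nat) : Int) := by
        rw [hN]; push_cast; omega
      have e2 : (traj.length : Int) - (j : Int) = ((traj.length - j : Nat) : Int) := by
        push_cast; omega
      rw [e1, e2, PySem.Int.mod_natCast]
      have e3 : ((j : Int)) + (((r.toNat - j) % (traj.length - j) : Nat) : Int)
          = ((j + (r.toNat - j) % (traj.length - j) : Nat) : Int) := by push_cast; ring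
      rw [e3, PySem.List.pyGetD_natCast]
      have hmodlt : (r.toNat - j) % (traj.length - j) < traj.length - j :=
        Nat.mod_lt _ (by omega)
      rw [htraj _ (by omega)]
      have hcyc := pv_iter_cycle f p j traj.length hj2 (hj3.trans rfl) (r.toNat - j)
      have e4 : j + (r.toNat - j) = r.toNat := by omega
      rw [e4] at hcyc
      exact hcyc.symm

-- B computes the same per-index iterate
theorem pv_B (blz modif : List Int) (mr mc r : Int) (hr : ¬ r ≤ 0) :
    move_blizzards_alt blz modif mr mc r
      = blz.mapIdx (fun i p => (fun q => pvStep mr mc (modif.getD i 0) q)^[r.toNat] p) := by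
  unfold move_blizzards_alt
  rw [if_neg hr]
  have hstep : pvStepB mc (mc - 2) (mc * (mr - 1)) (mc * (mr - 2)) = pvStep mr mc := rfl
  simp only [hstep]
  apply List.ext_getElem
  · simp [PySem.List.length_enumerate]
  · intro i h1 h2
    simp only [List.getElem_map, PySem.List.getElem_enumerate, List.getElem_mapIdx]
    simp only [Int.zero_add, PySem.List.pyGetD_natCast]
    have hib : i < blz.length := by simpa using h2
    have hadv := pv_adv (fun q => pvStep mr mc (modif.getD i 0) q) r (blz[i]'hib) (by omega)
      r.toNat PySem.Dict.empty []
      (by simp)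
      (by intro j hj; simp at hj)
      (by intro v jv hvg; rw [PySem.Dict.get?_empty] at hvg; exact absurd hvg (by simp))
    simpa using hadv

-- ===== VERDICT (by name: the statement is the Claim_ definition above) =====
theorem move_blizzards_spec : Claim_equal_move_blizzards := by
  intro blz modif mr mc r _ _
  unfold Spec_move_blizzards
  by_cases hr : r ≤ 0
  · unfold move_blizzards_alt
    rw [if_pos hr, pv_A]
    simp [Int.toNat_of_nonpos hr, pv_mapIdx_id]
  · rw [pv_A, pv_B blz modif mr mc r hr]

theorem move_blizzards_witness_ok :
    Dom_move_blizzards (pvWitness_move_blizzards.1) (pvWitness_move_blizzards.2.1) (pvWitness_move_blizzards.2.2.1) (pvWitness_move_blizzards.2.2.2.1) (pvWitness_move_blizzards.2.2.2.2) ∧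
    Pre_move_blizzards (pvWitness_move_blizzards.1) (pvWitness_move_blizzards.2.1) (pvWitness_move_blizzards.2.2.1) (pvWitness_move_blizzards.2.2.2.1) (pvWitness_move_blizzards.2.2.2.2) := by
  decide
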